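-- pv_equiv track=rewrite | github.com/SantaXXL/Codility | Other/Three non-consecutive ab.py | solution
-- ===== SOURCE A (Python) =====
-- def solution(A, B):
--     result = ''
--     arr = [[0 for x in range(2)] for y in range(2)]
--
--     if A > B:
--         arr[0][0] = A
--         arr[0][1] = 'a'
--         arr[1][0] = B
--         arr[1][1] = 'b'
--     else:
--         arr[0][0] = B
--         arr[0][1] = 'b'
--         arr[1][0] = A
--         arr[1][1] = 'a'
--
--     # crate 'aabaabaab...' or 'bbabbabba...' string to
--     # level the amount of 'a's and 'b's left
--     while arr[0][0] > arr[1][0] > 0: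
--         result += arr[0][1]
--         result += arr[0][1]
--         result += arr[1][1]
--         arr[0][0] -= 2
--         arr[1][0] -= 1
--
--     # append 'ab' or 'ba' string multiple times, until the less
--     # frequent character's counter will reach 0
--     while arr[1][0] > 0:
--         result += arr[0][1]
--         result += arr[1][1]
--         arr[0][0] -= 1
--         arr[1][0] -= 1
--
--     # and append, if there is any left, more frequent character
--     while arr[0][0] > 0:
--         result += arr[0][1]
--         arr[0][0] -= 1
--
--     return result
-- ===== SOURCE B (Python) =====
-- def solution(A, B):
--     # closed form: count the MML / ML / M blocks arithmetically instead of looping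
--     if A > B:
--         m, l, M, L = A, B, 'a', 'b'
--     else:
--         m, l, M, L = B, A, 'b', 'a'
--     if l <= 0:
--         return M * m
--     d = m - l
--     if d <= l:
--         return (M + M + L) * d + (M + L) * (l - d)
--     return (M + M + L) * l + M * (d - l)
-- ===== Notes on version B (the rewrite author's own statement) =====
-- stated objective: faster
-- what changed: Replaced the three character-by-character emitting while loops with a closed-form computation of the counts of 'MML', 'ML' and trailing 'M' blocks, building the result by string multiplication and concatenation.
import Mathlib
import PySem

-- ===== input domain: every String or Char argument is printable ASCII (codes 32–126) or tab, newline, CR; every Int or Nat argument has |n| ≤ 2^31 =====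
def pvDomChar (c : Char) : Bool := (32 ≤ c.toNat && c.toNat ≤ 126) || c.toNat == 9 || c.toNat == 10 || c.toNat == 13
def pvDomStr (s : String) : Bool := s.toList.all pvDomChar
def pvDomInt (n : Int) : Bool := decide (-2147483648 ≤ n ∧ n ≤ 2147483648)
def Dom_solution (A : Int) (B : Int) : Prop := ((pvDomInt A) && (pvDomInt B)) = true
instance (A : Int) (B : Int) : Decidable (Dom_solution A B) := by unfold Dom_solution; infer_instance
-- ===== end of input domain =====

-- B replaces A's three emitting while loops by a closed-form block count; objective: faster (no per-character loop).

-- ===== PORT A =====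
-- while arr[0][0] > arr[1][0] > 0: emit MML
def pvLoop1 (M L : List Char) (m l : Int) (acc : List Char) : List Char × Int × Int :=
  if l < m ∧ 0 < l then
    pvLoop1 M L (m - 2) (l - 1) (acc ++ M ++ M ++ L)
  else (acc, m, l)
termination_by l.toNat
decreasing_by omega

-- while arr[1][0] > 0: emit ML
def pvLoop2 (M L : List Char) (m l : Int) (acc : List Char) : List Char × Int :=
  if 0 < l then
    pvLoop2 M L (m - 1) (l - 1) (acc ++ M ++ L)
  else (acc, m)
termination_by l.toNat
decreasing_by omega

-- while arr[0][0] > 0: emit M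
def pvLoop3 (M : List Char) (m : Int) (acc : List Char) : List Char :=
  if 0 < m then
    pvLoop3 M (m - 1) (acc ++ M)
  else acc
termination_by m.toNat
decreasing_by omega

def solution (A : Int) (B : Int) : String :=
  let p := if A > B then (A, 'a', B, 'b') else (B, 'b', A, 'a')
  let r1 := pvLoop1 [p.2.1] [p.2.2.2] p.1 p.2.2.1 []
  let r2 := pvLoop2 [p.2.1] [p.2.2.2] r1.2.1 r1.2.2 r1.1
  String.mk (pvLoop3 [p.2.1] r2.2 r2.1)

-- ===== PORT B =====
def solution_alt (A : Int) (B : Int) : String :=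
  let p := if A > B then (A, B, 'a', 'b') else (B, A, 'b', 'a')
  let m := p.1; let l := p.2.1; let M := [p.2.2.1]; let L := [p.2.2.2]
  if l ≤ 0 then String.mk (PySem.List.pyRepeat M m)
  else
    let d := m - l
    if d ≤ l then
      String.mk (PySem.List.pyRepeat (M ++ M ++ L) d ++ PySem.List.pyRepeat (M ++ L) (l - d))
    else
      String.mk (PySem.List.pyRepeat (M ++ M ++ L) l ++ PySem.List.pyRepeat M (d - l))

-- ===== PRECONDITION & SPEC =====
def Spec_solution (A : Int) (B : Int) (out : String) : Prop := out = solution_alt A B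
instance (A : Int) (B : Int) (out : String) : Decidable (Spec_solution A B out) := by unfold Spec_solution; infer_instance

-- ===== CLAIM (what is proved, stated in full; the proofs are below) =====
def Claim_equal_solution : Prop := ∀ (A : Int) (B : Int), Dom_solution A B → Spec_solution A B (solution A B)

-- ===== LEMMAS AND PROOFS =====

theorem pyRepeat_nonpos {α : Type} (xs : List α) {n : Int} (h : n ≤ 0) :
    PySem.List.pyRepeat xs n = [] := by
  unfold PySem.List.pyRepeat
  rw [Int.toNat_of_nonpos h]
  rfl

theorem pyRepeat_pos {α : Type} (xs : List α) {n : Int} (h : 0 < n) :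
    PySem.List.pyRepeat xs n = xs ++ PySem.List.pyRepeat xs (n - 1) := by
  have h1 : n.toNat = (n - 1).toNat + 1 := by omega
  unfold PySem.List.pyRepeat
  rw [h1, List.replicate_succ, List.flatten_cons]

theorem pvLoop3_eq (M : List Char) : ∀ (n : Nat) (m : Int) (acc : List Char),
    m.toNat ≤ n → pvLoop3 M m acc = acc ++ PySem.List.pyRepeat M m := by
  intro n
  induction n with
  | zero =>
    intro m acc h
    have hm : ¬ 0 < m := by omega
    rw [pvLoop3, if_neg hm, pyRepeat_nonpos M (by omega), List.append_nil]
  | succ k ih =>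
    intro m acc h
    by_cases hm : 0 < m
    · rw [pvLoop3, if_pos hm, ih (m - 1) _ (by omega), pyRepeat_pos M hm, List.append_assoc]
    · rw [pvLoop3, if_neg hm, pyRepeat_nonpos M (by omega), List.append_nil]

theorem pvLoop2_eq (M L : List Char) : ∀ (n : Nat) (m l : Int) (acc : List Char),
    l.toNat ≤ n →
    pvLoop2 M L m l acc = (acc ++ PySem.List.pyRepeat (M ++ L) l, m - max l 0) := by
  intro n
  induction n with
  | zero =>
    intro m l acc h
    have hl : ¬ 0 < l := by omega
    rw [pvLoop2, if_neg hl, pyRepeat_nonpos _ (by omega), List.append_nil]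
    congr 1; omega
  | succ k ih =>
    intro m l acc h
    by_cases hl : 0 < l
    · rw [pvLoop2, if_pos hl, ih (m - 1) (l - 1) _ (by omega), pyRepeat_pos _ hl]
      simp only [Prod.mk.injEq]
      refine ⟨by simp [List.append_assoc], by omega⟩
    · rw [pvLoop2, if_neg hl, pyRepeat_nonpos _ (by omega), List.append_nil]
      congr 1; omega

-- the number of iterations of A's first loop
def pvK (m l : Int) : Int := if l ≤ 0 then 0 else min (m - l) l

theorem pvLoop1_eq (M L : List Char) : ∀ (n : Nat) (m l : Int) (acc : List Char),
    l.toNat ≤ n → l ≤ m →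
    pvLoop1 M L m l acc =
      (acc ++ PySem.List.pyRepeat (M ++ M ++ L) (pvK m l), m - 2 * pvK m l, l - pvK m l) := by
  intro n
  induction n with
  | zero =>
    intro m l acc h hlm
    have hc : ¬ (l < m ∧ 0 < l) := by omega
    have hk : pvK m l = 0 := by unfold pvK; split <;> omega
    rw [pvLoop1, if_neg hc, hk, pyRepeat_nonpos _ (by omega), List.append_nil]
    simp only [Prod.mk.injEq]
    refine ⟨by simp, by omega, by omega⟩
  | succ k ih =>
    intro m l acc h hlm
    by_cases hc : l < m ∧ 0 < l
    · have hk : pvK m l = pvK (m - 2) (l - 1) + 1 := by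
        unfold pvK; split <;> split <;> omega
      have hpos : 0 < pvK m l := by unfold pvK; split <;> omega
      rw [pvLoop1, if_pos hc, ih (m - 2) (l - 1) _ (by omega) (by omega), hk]
      simp only [Prod.mk.injEq]
      refine ⟨?_, by omega, by omega⟩
      rw [pyRepeat_pos (M ++ M ++ L) (show (0:Int) < pvK (m - 2) (l - 1) + 1 by omega),
        show pvK (m - 2) (l - 1) + 1 - 1 = pvK (m - 2) (l - 1) by ring]
      simp [List.append_assoc]
    · have hk : pvK m l = 0 := by unfold pvK; split <;> omega
      rw [pvLoop1, if_neg hc, hk, pyRepeat_nonpos _ (by omega), List.append_nil]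
      simp only [Prod.mk.injEq]
      refine ⟨by simp, by omega, by omega⟩

theorem solution_eq_alt (m l : Int) (Mc Lc : Char) (hlm : l ≤ m) :
    (let r1 := pvLoop1 [Mc] [Lc] m l []
     let r2 := pvLoop2 [Mc] [Lc] r1.2.1 r1.2.2 r1.1
     String.mk (pvLoop3 [Mc] r2.2 r2.1)) =
    (if l ≤ 0 then String.mk (PySem.List.pyRepeat [Mc] m)
     else if m - l ≤ l then
       String.mk (PySem.List.pyRepeat ([Mc] ++ [Mc] ++ [Lc]) (m - l) ++
         PySem.List.pyRepeat ([Mc] ++ [Lc]) (l - (m - l)))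
     else
       String.mk (PySem.List.pyRepeat ([Mc] ++ [Mc] ++ [Lc]) l ++
         PySem.List.pyRepeat [Mc] (m - l - l))) := by
  rw [pvLoop1_eq [Mc] [Lc] l.toNat m l [] (le_refl _) hlm]
  by_cases hl : l ≤ 0
  · have hk : pvK m l = 0 := by unfold pvK; split <;> omega
    simp only [hk]
    rw [pyRepeat_nonpos _ (le_refl _), List.append_nil]
    rw [pvLoop2_eq [Mc] [Lc] (l - 0).toNat _ _ _ (le_refl _)]
    rw [pyRepeat_nonpos ([Mc] ++ [Lc]) (show l - 0 ≤ 0 by omega)]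
    rw [pvLoop3_eq [Mc] (m - 2 * 0 - max (l - 0) 0).toNat _ _ (le_refl _)]
    rw [if_pos hl]
    simp only [List.append_nil, List.nil_append]
    congr 2
    omega
  · rw [if_neg hl]
    by_cases hd : m - l ≤ l
    · have hk : pvK m l = m - l := by unfold pvK; split <;> omega
      simp only [hk]
      rw [pvLoop2_eq [Mc] [Lc] (l - (m - l)).toNat _ _ _ (le_refl _)]
      rw [pvLoop3_eq [Mc] 0 _ _ (by omega)]
      rw [if_pos hd, List.nil_append]
      rw [pyRepeat_nonpos [Mc] (show m - 2 * (m - l) - max (l - (m - l)) 0 ≤ 0 by omega)]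
      rw [List.append_nil]
    · have hk : pvK m l = l := by unfold pvK; split <;> omega
      simp only [hk]
      rw [pvLoop2_eq [Mc] [Lc] (l - l).toNat _ _ _ (le_refl _)]
      rw [pyRepeat_nonpos (([Mc] ++ [Lc])) (show l - l ≤ 0 by omega), List.append_nil]
      rw [pvLoop3_eq [Mc] (m - 2 * l - max (l - l) 0).toNat _ _ (le_refl _)]
      rw [if_neg hd, List.nil_append]
      congr 3
      omega

-- ===== VERDICT (by name: the statement is the Claim_ definition above) =====
theorem solution_spec : Claim_equal_solution := by
  intro A B _
  unfold Spec_solution solution solution_alt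
  by_cases hAB : A > B
  · simp only [if_pos hAB]
    exact solution_eq_alt A B 'a' 'b' (by omega)
  · simp only [if_neg hAB]
    exact solution_eq_alt B A 'b' 'a' (by omega)
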